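-- pv_equiv track=rewrite | github.com/VishalHaswani/Password-Managment-System-using-AES256 | hexAndString.py | string2hex
-- ===== SOURCE A (Python) =====
-- bina={'0000':'0','0001':'1','0010':'2','0011':'3','0100':'4','0101':'5','0110':'6','0111':'7',
--     '1000':'8','1001':'9','1010':'a','1011':'b','1100':'c','1101':'d','1110':'e','1111':'f'}
--
-- def string2hex(string, bytes):
--     string_len=len(string)
--     string=[("00000000" + bin(ord(string[i]))[2:])[-8:] for i in range(string_len)]
--     string=''.join(string)
--     he=""
--     for i in range(0,len(string),4):
--         he += bina[string[i:i+4]]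
--     temp = ((bytes*2) - len(he)) % (bytes*2)  # temp = number of padding bits
--     he += "0" * temp
--     res=[he[i: i+(bytes*2)] for i in range(0,len(he),(bytes*2))] + [("0"*(bytes*2)+(hex(temp))[2:])[(-2*bytes):]]
--     return res
-- ===== SOURCE B (Python) =====
-- def string2hex(string, bytes):
--     he = ''.join(format(ord(c) & 0xFF, '02x') for c in string)
--     width = bytes * 2
--     temp = -len(he) % width  # padding needed to reach a multiple of width
--     he += '0' * temp
--     res = [he[i: i + width] for i in range(0, len(he), width)]
--     res.append(format(temp, 'x').zfill(width))
--     return res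
-- ===== Notes on version B (the rewrite author's own statement) =====
-- stated objective: faster
-- what changed: B drops A's binary-string intermediate (per-char 8-bit strings joined and re-scanned in 4-bit groups through the bina lookup table) and emits the two hex digits of each character directly in a single pass with format(...,'02x'); the final pad-count chunk is produced with zfill instead of slicing a hand-built '0'*width prefix.
-- outside the precondition, e.g. on string2hex('a', -2): A returns [''], B returns ['-2']
import Mathlib
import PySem

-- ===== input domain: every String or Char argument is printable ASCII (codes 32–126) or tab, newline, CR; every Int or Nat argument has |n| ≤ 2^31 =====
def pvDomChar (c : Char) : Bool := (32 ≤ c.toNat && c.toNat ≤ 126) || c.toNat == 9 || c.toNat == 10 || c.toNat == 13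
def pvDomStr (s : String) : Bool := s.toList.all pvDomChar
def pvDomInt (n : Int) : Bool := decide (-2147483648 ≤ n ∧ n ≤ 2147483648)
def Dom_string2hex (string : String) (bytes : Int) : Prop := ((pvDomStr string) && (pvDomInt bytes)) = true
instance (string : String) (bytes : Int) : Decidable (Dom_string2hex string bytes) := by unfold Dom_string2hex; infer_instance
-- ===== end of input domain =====

-- B replaces A's binary-string intermediate and 4-bit-group dict lookups by one direct
-- pass emitting two hex digits per character (idiomatic; same return value on Pre_).

-- ===== PORT A =====
-- the module-level dict 'bina'
def pvBina : PySem.Dict (List Char) (List Char) := PySem.Dict.mk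
  [(['0','0','0','0'],['0']), (['0','0','0','1'],['1']), (['0','0','1','0'],['2']), (['0','0','1','1'],['3']),
   (['0','1','0','0'],['4']), (['0','1','0','1'],['5']), (['0','1','1','0'],['6']), (['0','1','1','1'],['7']),
   (['1','0','0','0'],['8']), (['1','0','0','1'],['9']), (['1','0','1','0'],['a']), (['1','0','1','1'],['b']),
   (['1','1','0','0'],['c']), (['1','1','0','1'],['d']), (['1','1','1','0'],['e']), (['1','1','1','1'],['f'])]

-- hand port of Python's hex(n) as a char list ("0x…"/"-0x…"); exact (Nat.toDigits 16 gives
-- lowercase hex digits, as CPython does)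
def pvPyHexChars (n : Int) : List Char :=
  if n < 0 then '-' :: '0' :: 'x' :: Nat.toDigits 16 n.natAbs else '0' :: 'x' :: Nat.toDigits 16 n.toNat

def string2hex (string : String) (bytes : Int) : List String :=
  let string_len := PySem.Str.len string
  let sL := string.toList
  -- string = [("00000000" + bin(ord(string[i]))[2:])[-8:] for i in range(string_len)]
  -- (string[i] is in range for i in range(string_len): pyGetD's default is never used)
  let bits : List (List Char) :=
    (PySem.List.pyRange 0 string_len 1).map (fun i =>
      PySem.List.slice
        (['0','0','0','0','0','0','0','0'] ++
          PySem.List.slice (PySem.Int.toBinChars0b ((PySem.List.pyGetD sL i ' ').toNat : Int)) (some 2) none)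
        (some (-8)) none)
  -- string = ''.join(string)
  let s := bits.flatten
  -- for i in range(0, len(string), 4): he += bina[string[i:i+4]]
  -- (every 4-char group of s is a key of bina, so the KeyError default [] is never used)
  let he : List Char :=
    (PySem.List.pyRange 0 (PySem.List.len s) 4).foldl
      (fun he i => he ++ PySem.Dict.getD pvBina (PySem.List.slice s (some i) (some (i + 4))) []) []
  -- temp = ((bytes*2) - len(he)) % (bytes*2)
  let temp := PySem.Int.mod (bytes * 2 - PySem.List.len he) (bytes * 2)
  -- he += "0" * temp
  let he := he ++ PySem.List.pyRepeat ['0'] temp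
  -- res = [he[i: i+(bytes*2)] for i in range(0,len(he),(bytes*2))] + [("0"*(bytes*2)+(hex(temp))[2:])[(-2*bytes):]]
  let res := (PySem.List.pyRange 0 (PySem.List.len he) (bytes * 2)).map
      (fun i => PySem.List.slice he (some i) (some (i + bytes * 2)))
  let last := PySem.List.slice
      (PySem.List.pyRepeat ['0'] (bytes * 2) ++ PySem.List.slice (pvPyHexChars temp) (some 2) none)
      (some (-(2 * bytes))) none
  (res.map (fun cs => String.ofList cs)) ++ [String.ofList last]

-- ===== PORT B =====
-- hand port of Python's format(n, 'x') as a char list (lowercase hex digits, '-' first); exact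
def pvFormatHexChars (n : Int) : List Char :=
  if n < 0 then '-' :: Nat.toDigits 16 n.natAbs else Nat.toDigits 16 n.toNat

def string2hex_alt (string : String) (bytes : Int) : List String :=
  -- he = ''.join(format(ord(c) & 0xFF, '02x') for c in string)   (format(m,'02x') = format(m,'x').zfill(2))
  let he : List Char :=
    (string.toList.map (fun c =>
      PySem.Chars.zfill (pvFormatHexChars (PySem.Int.band (c.toNat : Int) 255)) 2)).flatten
  let width := bytes * 2
  -- temp = -len(he) % width
  let temp := PySem.Int.mod (-(PySem.List.len he)) width
  -- he += '0' * temp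
  let he := he ++ PySem.List.pyRepeat ['0'] temp
  -- res = [he[i: i+width] for i in range(0, len(he), width)]
  let res := (PySem.List.pyRange 0 (PySem.List.len he) width).map
      (fun i => PySem.List.slice he (some i) (some (i + width)))
  -- res.append(format(temp, 'x').zfill(width))
  (res.map (fun cs => String.ofList cs)) ++ [String.ofList (PySem.Chars.zfill (pvFormatHexChars temp) width)]

-- ===== PRECONDITION & SPEC =====
-- Pre_ excludes bytes ≤ 0: for bytes = 0 A raises ZeroDivisionError; a negative byte count is
-- outside the task's natural domain (A then returns a degenerate [''] through empty slices).
def Pre_string2hex (string : String) (bytes : Int) : Prop := 1 ≤ bytes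
instance (string : String) (bytes : Int) : Decidable (Pre_string2hex string bytes) := by unfold Pre_string2hex; infer_instance
def pvWitness_string2hex : String × Int := ("ab", 3)
def Spec_string2hex (string : String) (bytes : Int) (out : List String) : Prop := out = string2hex_alt string bytes
instance (string : String) (bytes : Int) (out : List String) : Decidable (Spec_string2hex string bytes out) := by unfold Spec_string2hex; infer_instance

-- ===== CLAIM (what is proved, stated in full; the proofs are below) =====
def Claim_equal_string2hex : Prop := ∀ (string : String) (bytes : Int), Dom_string2hex string bytes → Pre_string2hex string bytes → Spec_string2hex string bytes (string2hex string bytes)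

-- ===== LEMMAS AND PROOFS =====

-- A's per-character 8-bit pattern, and the per-character hex pair each side produces
def pvFA (c : Char) : List Char :=
  PySem.List.slice
    (['0','0','0','0','0','0','0','0'] ++
      PySem.List.slice (PySem.Int.toBinChars0b ((c.toNat : Int))) (some 2) none)
    (some (-8)) none

def pvG (cs : List Char) : List Char := PySem.Dict.getD pvBina cs []

def pvFB (c : Char) : List Char :=
  PySem.Chars.zfill (pvFormatHexChars (PySem.Int.band (c.toNat : Int) 255)) 2

lemma pvFA_len (c : Char) : (pvFA c).length = 8 := by
  unfold pvFA
  rw [PySem.List.slice_from_neg_ofNat _ 8 (by norm_num)]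
  simp [List.length_drop]
  omega

lemma pvFlattenLen (L : List (List Char)) (h8 : ∀ a ∈ L, a.length = 8) :
    L.flatten.length = 8 * L.length := by
  induction L with
  | nil => simp
  | cons a t ih =>
    simp only [List.flatten_cons, List.length_append, List.length_cons]
    rw [h8 a (by simp), ih (fun x hx => h8 x (by simp [hx]))]
    ring

lemma pvChunkCore (G : List Char → List Char) :
    ∀ (L : List (List Char)), (∀ a ∈ L, a.length = 8) →
      (List.range (2 * L.length)).flatMap (fun k => G ((L.flatten.drop (4 * k)).take 4))
        = (L.map (fun a => G (a.take 4) ++ G (a.drop 4))).flatten := by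
  intro L
  induction L with
  | nil => intro _; simp
  | cons a t ih =>
    intro h8
    have ha : a.length = 8 := h8 a (by simp)
    have ht : ∀ x ∈ t, x.length = 8 := fun x hx => h8 x (by simp [hx])
    have hrange : List.range (2 * (t.length + 1)) = 0 :: 1 :: (List.range (2 * t.length)).map (fun k => k + 2) := by
      have h1 : 2 * (t.length + 1) = 2 * t.length + 1 + 1 := by ring
      rw [h1, List.range_succ_eq_map, List.range_succ_eq_map, List.map_cons, List.map_map]
      refine congrArg _ (congrArg _ (List.map_congr_left (fun k _ => ?_)))
      simp [Function.comp, Nat.succ_eq_add_one]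
    simp only [List.length_cons, hrange, List.flatMap_cons, List.flatMap_map]
    have e0 : ((a ++ t.flatten).drop (4 * 0)).take 4 = a.take 4 := by
      simp [List.take_append_of_le_length (by omega : 4 ≤ a.length)]
    have e1 : ((a ++ t.flatten).drop (4 * 1)).take 4 = a.drop 4 := by
      rw [show 4 * 1 = 4 by norm_num, List.drop_append_of_le_length (by omega : 4 ≤ a.length)]
      rw [List.take_append_of_le_length (by simp [ha] : 4 ≤ (a.drop 4).length)]
      exact List.take_of_length_le (by simp [ha])
    have e2 : ∀ k, ((a ++ t.flatten).drop (4 * (k + 2))).take 4 = ((t.flatten.drop (4 * k)).take 4) := by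
      intro k
      have h1 : 4 * (k + 2) = a.length + 4 * k := by omega
      rw [h1, List.drop_append, List.drop_of_length_le (by omega : a.length ≤ a.length + 4 * k),
        List.nil_append, show a.length + 4 * k - a.length = 4 * k by omega]
    simp only [List.flatten_cons, List.map_cons, e0, e1]
    rw [List.flatMap_congr (fun k _ => by rw [e2 k]), ih ht]
    simp [List.append_assoc]

lemma pvChunk (G : List Char → List Char) (L : List (List Char)) (h8 : ∀ a ∈ L, a.length = 8) :
    (PySem.List.pyRange 0 (PySem.List.len L.flatten) 4).flatMap
      (fun i => G (PySem.List.slice L.flatten (some i) (some (i + 4))))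
      = (L.map (fun a => G (a.take 4) ++ G (a.drop 4))).flatten := by
  rw [PySem.List.len_eq, pvFlattenLen L h8]
  rw [PySem.List.pyRange_of_pos _ _ (by norm_num : (0:Int) < 4)]
  rcases Nat.eq_zero_or_pos L.length with h0 | hpos
  · have hL : L = [] := List.length_eq_zero_iff.mp h0
    subst hL; simp
  · rw [if_pos (by push_cast; omega)]
    have hK : (((8 * L.length : Nat) : Int) - 0 + 4 - 1) / 4 = (2 * L.length : Nat) := by
      push_cast; omega
    rw [hK, Int.toNat_natCast, List.flatMap_map]
    rw [List.flatMap_congr (fun k _ => ?_)]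
    · exact pvChunkCore G L h8
    · have hc : (0 : Int) + 4 * (k : Int) = ((4 * k : Nat) : Int) := by push_cast; ring
      rw [hc, show ((4 * k : Nat) : Int) + 4 = ((4 * k : Nat) : Int) + ((4 : Nat) : Int) by norm_num,
        PySem.List.slice_natCast_add]

-- per character: A's two 4-bit-group dict lookups produce exactly B's two hex digits
set_option maxRecDepth 40000 in
lemma pvPerChar : ∀ n : Nat, n < 128 →
    pvG ((pvFA (Char.ofNat n)).take 4) ++ pvG ((pvFA (Char.ofNat n)).drop 4) = pvFB (Char.ofNat n) := by
  decide

lemma pvBits_eq (s : String) :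
    (PySem.List.pyRange 0 (PySem.Str.len s) 1).map (fun i =>
      PySem.List.slice
        (['0','0','0','0','0','0','0','0'] ++
          PySem.List.slice (PySem.Int.toBinChars0b ((PySem.List.pyGetD s.toList i ' ').toNat : Int)) (some 2) none)
        (some (-8)) none)
      = s.toList.map pvFA := by
  rw [PySem.Str.len_eq, ← PySem.List.len_eq]
  rw [show (fun (i : Int) =>
      PySem.List.slice
        (['0','0','0','0','0','0','0','0'] ++
          PySem.List.slice (PySem.Int.toBinChars0b ((PySem.List.pyGetD s.toList i ' ').toNat : Int)) (some 2) none)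
        (some (-8)) none) = pvFA ∘ (fun j => PySem.List.pyGetD s.toList j ' ') from rfl]
  rw [← List.map_map, PySem.List.map_pyGetD_pyRange_zero]

lemma pvHe_eq (s : String) (hdom : pvDomStr s = true) :
    (PySem.List.pyRange 0 (PySem.List.len (s.toList.map pvFA).flatten) 4).foldl
      (fun he i => he ++ pvBina.getD (PySem.List.slice (s.toList.map pvFA).flatten (some i) (some (i + 4))) []) []
      = (s.toList.map (fun c =>
          PySem.Chars.zfill (pvFormatHexChars (PySem.Int.band (c.toNat : Int) 255)) 2)).flatten := by
  show (PySem.List.pyRange 0 (PySem.List.len (s.toList.map pvFA).flatten) 4).foldl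
      (fun he i => he ++ pvG (PySem.List.slice (s.toList.map pvFA).flatten (some i) (some (i + 4)))) []
      = (s.toList.map pvFB).flatten
  rw [PySem.List.foldl_append_eq_flatMap]
  rw [List.nil_append]
  rw [pvChunk pvG (s.toList.map pvFA) (by intro a ha; rcases List.mem_map.mp ha with ⟨c, _, rfl⟩; exact pvFA_len c)]
  rw [List.map_map]
  congr 1
  apply List.map_congr_left
  intro c hc
  have hdc : pvDomChar c = true := List.all_eq_true.mp hdom c hc
  have hn : c.toNat < 128 := by
    unfold pvDomChar at hdc
    simp only [Bool.or_eq_true, Bool.and_eq_true, decide_eq_true_eq, beq_iff_eq] at hdc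
    omega
  have := pvPerChar c.toNat hn
  rwa [Char.ofNat_toNat] at this

-- facts about Nat.toDigits 16 needed for the final padded-hex chunk
lemma pvToDigitsCore_mem (b f : Nat) (hb : 0 < b) : ∀ (n : Nat) (acc : List Char) (c : Char),
    c ∈ Nat.toDigitsCore b f n acc → c ∈ acc ∨ ∃ k, k < b ∧ c = Nat.digitChar k := by
  induction f with
  | zero => intro n acc c h; exact Or.inl h
  | succ f ih =>
    intro n acc c h
    simp only [Nat.toDigitsCore] at h
    split at h
    · rcases List.mem_cons.mp h with h | h
      · exact Or.inr ⟨n % b, Nat.mod_lt _ hb, h⟩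
      · exact Or.inl h
    · rcases ih (n / b) ((n % b).digitChar :: acc) c h with h | h
      · rcases List.mem_cons.mp h with h | h
        · exact Or.inr ⟨n % b, Nat.mod_lt _ hb, h⟩
        · exact Or.inl h
      · exact Or.inr h

lemma pvDigitChar_not_sign (k : Nat) (hk : k < 16) :
    ¬(Nat.digitChar k = '+' ∨ Nat.digitChar k = '-') := by
  interval_cases k <;> decide

lemma pvToDigits_not_sign (m : Nat) (c : Char) (h : c ∈ Nat.toDigits 16 m) :
    ¬(c = '+' ∨ c = '-') := by
  rcases pvToDigitsCore_mem 16 (m + 1) (by norm_num) m [] c h with h | ⟨k, hk, rfl⟩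
  · simp at h
  · exact pvDigitChar_not_sign k hk

lemma pvToDigitsCore_len_le (b : Nat) : ∀ (f n : Nat) (acc : List Char),
    acc.length ≤ (Nat.toDigitsCore b f n acc).length := by
  intro f
  induction f with
  | zero => intro n acc; simp [Nat.toDigitsCore]
  | succ f ih =>
    intro n acc
    simp only [Nat.toDigitsCore]
    split
    · simp
    · exact le_trans (by simp) (ih (n / b) ((n % b).digitChar :: acc))

lemma pvToDigitsCore_len_lt (b : Nat) : ∀ (f n : Nat) (acc : List Char), 0 < f →
    acc.length < (Nat.toDigitsCore b f n acc).length := by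
  intro f
  induction f with
  | zero => intro n acc h; omega
  | succ f _ =>
    intro n acc _
    simp only [Nat.toDigitsCore]
    split
    · simp
    · exact lt_of_lt_of_le (by simp) (pvToDigitsCore_len_le b f (n / b) ((n % b).digitChar :: acc))

lemma pvToDigits_length_pos (m : Nat) : 0 < (Nat.toDigits 16 m).length := by
  have := pvToDigitsCore_len_lt 16 (m + 1) m [] (by omega)
  simpa using this

-- the final chunk: A's "0"*(2b) ++ hex digits, sliced to the last 2b chars, is B's zfill
lemma pvLast_eq (bytes temp : Int) (hb : 1 ≤ bytes) (h0 : 0 ≤ temp) (ht : temp < bytes * 2) :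
    PySem.List.slice
      (PySem.List.pyRepeat ['0'] (bytes * 2) ++ PySem.List.slice (pvPyHexChars temp) (some 2) none)
      (some (-(2 * bytes))) none
      = PySem.Chars.zfill (pvFormatHexChars temp) (bytes * 2) := by
  set d := Nat.toDigits 16 temp.toNat with hd
  set w0 := (bytes * 2).toNat with hw0
  have hwpos : 0 < w0 := by omega
  have hld : d.length ≤ w0 := by
    apply Nat.toDigits_length 16 temp.toNat w0 hwpos
    calc temp.toNat < w0 := by omega
    _ < 16 ^ w0 := Nat.lt_pow_self (by norm_num)
  have hhex : pvPyHexChars temp = '0' :: 'x' :: d := by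
    unfold pvPyHexChars; rw [if_neg (by omega)]
  have hfmt : pvFormatHexChars temp = d := by
    unfold pvFormatHexChars; rw [if_neg (by omega)]
  rw [hhex, hfmt, PySem.List.slice_from _ (by norm_num : (0:Int) ≤ 2)]
  rw [show ((2:Int).toNat) = 2 from rfl]
  rw [show List.drop 2 ('0' :: 'x' :: d) = d from rfl]
  rw [PySem.List.pyRepeat_singleton]
  rw [show -(2 * bytes) = -((w0 : Nat) : Int) by omega]
  rw [PySem.List.slice_from_neg_natCast _ w0 hwpos]
  rw [List.length_append, List.length_replicate]
  rw [show w0 + d.length - w0 = d.length by omega]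
  rw [List.drop_append_of_le_length (by simpa using hld), List.drop_replicate]
  unfold PySem.Chars.zfill
  by_cases hcase : bytes * 2 ≤ (d.length : Int)
  · rw [if_pos hcase]
    have hdl : d.length = w0 := by omega
    rw [hdl, show w0 - w0 = 0 by omega]
    simp
  · rw [if_neg hcase]
    have hne : d ≠ [] := by
      have := pvToDigits_length_pos temp.toNat
      intro h; rw [← hd] at *; simp [h] at this
    rcases d with _ | ⟨c, rest⟩
    · exact absurd rfl hne
    · dsimp only
      rw [if_neg (pvToDigits_not_sign temp.toNat c (by rw [← hd]; simp))]

-- ===== VERDICT (by name: the statement is the Claim_ definition above) =====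
theorem string2hex_spec : Claim_equal_string2hex := by
  intro string bytes hdom hpre
  have hds : pvDomStr string = true := by
    unfold Dom_string2hex at hdom
    exact (Bool.and_eq_true _ _ |>.mp hdom).1
  have hb : 1 ≤ bytes := hpre
  have h2b : (0 : Int) < bytes * 2 := by omega
  unfold Spec_string2hex string2hex string2hex_alt
  dsimp only
  rw [pvBits_eq string]
  rw [pvHe_eq string hds]
  have htemp : ∀ L : Int,
      PySem.Int.mod (bytes * 2 - L) (bytes * 2) = PySem.Int.mod (-L) (bytes * 2) := by
    intro L
    rw [PySem.Int.mod_eq_emod_of_pos h2b, PySem.Int.mod_eq_emod_of_pos h2b,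
      show bytes * 2 - L = -L + bytes * 2 * 1 by ring, Int.add_mul_emod_self_left]
  rw [htemp]
  rw [pvLast_eq bytes _ hb (PySem.Int.mod_nonneg _ h2b) (PySem.Int.mod_lt _ h2b)]
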